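-- pv_equiv track=rewrite | github.com/CSIE-Camp/example_code_2024 | Python_Basic/7_game.py | get_actual_board
-- ===== SOURCE A (Python) =====
-- def get_actual_board(board):
--     # Remove rows that are completely 'x'
--     actual_board = [row for row in board if any(cell != 'x' for cell in row)]
--     if not actual_board:
--         return []
--
--     # Find the first and last columns that are not entirely 'x'
--     first_col = len(actual_board[0])
--     last_col = 0
--     for row in actual_board:
--         for j, cell in enumerate(row):
--             if cell != 'x':
--                 first_col = min(first_col, j)
--                 last_col = max(last_col, j)
--
--     # Trim the columns that are completely 'x'
--     actual_board = [row[first_col:last_col+1] for row in actual_board]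
--     return actual_board
-- ===== SOURCE B (Python) =====
-- def get_actual_board(board):
--     # Keep rows having any non-'x' cell; then trim columns by scanning from the
--     # outside in for the first/last column index that holds a non-'x' cell.
--     rows = [row for row in board if any(cell != 'x' for cell in row)]
--     if not rows:
--         return []
--     width = 0
--     for row in rows:
--         width = max(width, len(row))
--
--     def col_has(j):
--         return any(j < len(row) and row[j] != 'x' for row in rows)
--
--     first_col = next(j for j in range(width) if col_has(j))
--     last_col = next(j for j in reversed(range(width)) if col_has(j))
--     return [row[first_col:last_col + 1] for row in rows]
-- ===== Notes on version B (the rewrite author's own statement) =====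
-- stated objective: alternative
-- what changed: Instead of folding min/max over every non-'x' cell index, B computes the board width and locates the trim bounds by scanning column indices from the outside in (first hit from the left, first hit from the right) with a column predicate.
import Mathlib
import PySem

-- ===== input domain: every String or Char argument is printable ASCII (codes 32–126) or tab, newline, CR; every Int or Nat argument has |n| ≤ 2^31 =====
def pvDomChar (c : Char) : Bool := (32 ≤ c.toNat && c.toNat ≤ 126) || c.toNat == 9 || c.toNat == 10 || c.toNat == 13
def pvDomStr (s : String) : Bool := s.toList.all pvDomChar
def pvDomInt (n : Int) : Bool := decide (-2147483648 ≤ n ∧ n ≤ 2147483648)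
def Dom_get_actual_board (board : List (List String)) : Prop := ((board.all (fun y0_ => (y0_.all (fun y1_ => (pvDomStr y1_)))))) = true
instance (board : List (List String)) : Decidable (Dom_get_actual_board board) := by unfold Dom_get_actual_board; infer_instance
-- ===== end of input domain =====

-- B trims the same rows but finds the column bounds by outside-in scans over column
-- indices instead of A's min/max fold over every non-'x' cell; same cost, different shape.

-- ===== PORT A =====
def get_actual_board (board : List (List String)) : List (List String) :=
  let actual := board.filter (fun row => row.any (fun cell => cell != "x"))
  if actual = [] then []
  else
    let p := actual.foldl
      (fun (q : Int × Int) row =>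
        (PySem.List.enumerate row 0).foldl
          (fun (q : Int × Int) jc =>
            if jc.2 != "x" then (min q.1 jc.1, max q.2 jc.1) else q) q)
      (((actual.headD []).length : Int), 0)
    actual.map (fun row => PySem.List.slice row (some p.1) (some (p.2 + 1)))

-- ===== PORT B =====
-- col_has(j): some surviving row has a non-'x' cell in column j
def pvColHas (rows : List (List String)) (j : Nat) : Bool :=
  rows.any (fun row => decide (j < row.length) && (row.getD j "" != "x"))

def get_actual_board_alt (board : List (List String)) : List (List String) :=
  let rows := board.filter (fun row => row.any (fun cell => cell != "x"))
  if rows = [] then []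
  else
    let width := rows.foldl (fun w row => max w row.length) 0
    let first := ((List.range width).find? (pvColHas rows)).getD 0
    let last := ((List.range width).reverse.find? (pvColHas rows)).getD 0
    rows.map (fun row => PySem.List.slice row (some (first : Int)) (some ((last : Int) + 1)))

-- ===== PRECONDITION & SPEC =====
def Spec_get_actual_board (board : List (List String)) (out : List (List String)) : Prop := out = get_actual_board_alt board
instance (board : List (List String)) (out : List (List String)) : Decidable (Spec_get_actual_board board out) := by unfold Spec_get_actual_board; infer_instance

-- ===== CLAIM (what is proved, stated in full; the proofs are below) =====
def Claim_equal_get_actual_board : Prop := ∀ (board : List (List String)), Dom_get_actual_board board → Spec_get_actual_board board (get_actual_board board)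

-- ===== LEMMAS AND PROOFS =====

-- the inner 'if' loop is a fold over the filtered, projected hit indices
theorem pv_foldl_if_filter_map {α β γ : Type} (P : α → Bool) (g : α → γ) (f : β → γ → β) :
    ∀ (l : List α) (b : β),
      List.foldl (fun b x => if P x then f b (g x) else b) b l
        = List.foldl f b ((l.filter P).map g) := by
  intro l
  induction l with
  | nil => intro b; rfl
  | cons x xs ih =>
    intro b
    by_cases hp : P x = true <;> simp [List.filter_cons, hp, ih]

theorem pv_foldl_flatMap {α β γ : Type} (g : α → List γ) (f : β → γ → β) :
    ∀ (l : List α) (b : β),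
      List.foldl f b (l.flatMap g) = List.foldl (fun b a => List.foldl f b (g a)) b l := by
  intro l
  induction l with
  | nil => intro b; rfl
  | cons x xs ih => intro b; simp [List.flatMap_cons, List.foldl_append, ih]

theorem pv_foldl_minmax (H : List Int) :
    ∀ (a b : Int),
      List.foldl (fun (q : Int × Int) j => (min q.1 j, max q.2 j)) (a, b) H
        = (List.foldl min a H, List.foldl max b H) := by
  induction H with
  | nil => intro a b; rfl
  | cons x xs ih => intro a b; simp [List.foldl, ih]

theorem pv_foldl_min_le_init (H : List Int) : ∀ a : Int, List.foldl min a H ≤ a := by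
  induction H with
  | nil => intro a; exact le_refl a
  | cons x xs ih =>
    intro a
    exact le_trans (ih (min a x)) (min_le_left a x)

theorem pv_foldl_min_le_mem (H : List Int) :
    ∀ (a x : Int), x ∈ H → List.foldl min a H ≤ x := by
  induction H with
  | nil => intro a x hx; cases hx
  | cons y ys ih =>
    intro a x hx
    rcases List.mem_cons.mp hx with h | h
    · subst h
      exact le_trans (pv_foldl_min_le_init ys (min a x)) (min_le_right a x)
    · exact ih (min a y) x h

theorem pv_foldl_min_cases (H : List Int) :
    ∀ a : Int, List.foldl min a H = a ∨ List.foldl min a H ∈ H := by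
  induction H with
  | nil => intro a; exact Or.inl rfl
  | cons x xs ih =>
    intro a
    rcases ih (min a x) with h | h
    · rcases min_cases a x with ⟨he, _⟩ | ⟨he, _⟩
      · exact Or.inl (h.trans he)
      · exact Or.inr (List.mem_cons.mpr (Or.inl (h.trans he)))
    · exact Or.inr (List.mem_cons.mpr (Or.inr h))

theorem pv_foldl_max_ge_init (H : List Int) : ∀ a : Int, a ≤ List.foldl max a H := by
  induction H with
  | nil => intro a; exact le_refl a
  | cons x xs ih =>
    intro a
    exact le_trans (le_max_left a x) (ih (max a x))

theorem pv_foldl_max_ge_mem (H : List Int) :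
    ∀ (a x : Int), x ∈ H → x ≤ List.foldl max a H := by
  induction H with
  | nil => intro a x hx; cases hx
  | cons y ys ih =>
    intro a x hx
    rcases List.mem_cons.mp hx with h | h
    · subst h
      exact le_trans (le_max_right a x) (pv_foldl_max_ge_init ys (max a x))
    · exact ih (max a y) x h

theorem pv_foldl_max_cases (H : List Int) :
    ∀ a : Int, List.foldl max a H = a ∨ List.foldl max a H ∈ H := by
  induction H with
  | nil => intro a; exact Or.inl rfl
  | cons x xs ih =>
    intro a
    rcases ih (max a x) with h | h
    · rcases max_cases a x with ⟨he, _⟩ | ⟨he, _⟩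
      · exact Or.inl (h.trans he)
      · exact Or.inr (List.mem_cons.mpr (Or.inl (h.trans he)))
    · exact Or.inr (List.mem_cons.mpr (Or.inr h))

-- width fold bounds every row length
theorem pv_foldl_maxlen_init (rows : List (List String)) :
    ∀ w : Nat, w ≤ rows.foldl (fun w r => max w r.length) w := by
  induction rows with
  | nil => intro w; exact le_refl w
  | cons r rs ih =>
    intro w
    exact le_trans (le_max_left _ _) (ih (max w r.length))

theorem pv_foldl_maxlen_ge (rows : List (List String)) :
    ∀ (w : Nat) (row : List String), row ∈ rows → row.length ≤ rows.foldl (fun w r => max w r.length) w := by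
  induction rows with
  | nil => intro w row h; cases h
  | cons r rs ih =>
    intro w row h
    rcases List.mem_cons.mp h with h | h
    · subst h
      exact le_trans (le_max_right w row.length) (pv_foldl_maxlen_init rs _)
    · exact ih (max w r.length) row h

-- the hit-index list: indices (as Int) of non-'x' cells, rows flattened in order
def pvHits (rows : List (List String)) : List Int :=
  rows.flatMap (fun row => ((PySem.List.enumerate row 0).filter (fun jc => jc.2 != "x")).map (·.1))

theorem pv_mem_hits_iff (rows : List (List String)) (j : Int) :
    j ∈ pvHits rows ↔ ∃ k : Nat, pvColHas rows k = true ∧ j = (k : Int) := by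
  unfold pvHits pvColHas
  simp only [List.mem_flatMap, List.mem_map, List.mem_filter, List.any_eq_true]
  constructor
  · rintro ⟨row, hrow, jc, ⟨hmem, hne⟩, rfl⟩
    rcases (PySem.List.mem_enumerate_iff _ _ _).mp hmem with ⟨k, hk, rfl⟩
    refine ⟨k, ⟨row, hrow, ?_⟩, by simp⟩
    simp [hk, List.getD_eq_getElem _ _ hk]
    simpa using hne
  · rintro ⟨k, ⟨row, hrow, hcond⟩, rfl⟩
    have hk : k < row.length := by
      by_contra h
      simp [h] at hcond
    have hne : row[k] ≠ "x" := by
      simpa [hk, List.getD_eq_getElem _ _ hk] using hcond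
    exact ⟨row, hrow, ((0 : Int) + k, row[k]),
      ⟨(PySem.List.mem_enumerate_iff _ _ _).mpr ⟨k, hk, rfl⟩, by simpa using hne⟩, by simp⟩

-- find? over range finds the least satisfying index
theorem pv_find_range' (P : Nat → Bool) :
    ∀ (s n m : Nat), s ≤ m → m < s + n → P m = true → (∀ k, s ≤ k → k < m → P k = false) →
      (List.range' s n).find? P = some m := by
  intro s n
  induction n generalizing s with
  | zero => intro m h1 h2; omega
  | succ n ih =>
    intro m h1 h2 hPm hmin
    rw [List.range'_succ]
    by_cases hs : m = s
    · subst hs; simp [List.find?_cons, hPm]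
    · have hPs : P s = false := hmin s (le_refl s) (by omega)
      rw [List.find?_cons, hPs]
      exact ih (s + 1) m (by omega) (by omega) hPm (fun k hk1 hk2 => hmin k (by omega) hk2)

theorem pv_find_range (P : Nat → Bool) (w m : Nat) (hm : m < w) (hPm : P m = true)
    (hmin : ∀ k, k < m → P k = false) : (List.range w).find? P = some m := by
  rw [List.range_eq_range']
  exact pv_find_range' P 0 w m (Nat.zero_le m) (by omega) hPm (fun k _ hk => hmin k hk)

theorem pv_find_range_rev (P : Nat → Bool) :
    ∀ (w m : Nat), m < w → P m = true → (∀ k, m < k → k < w → P k = false) →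
      (List.range w).reverse.find? P = some m := by
  intro w
  induction w with
  | zero => intro m h; omega
  | succ w ih =>
    intro m hm hPm hmax
    rw [List.range_succ, List.reverse_append]
    by_cases hw : m = w
    · subst hw; simp [List.find?_cons, hPm]
    · have hPw : P w = false := hmax w (by omega) (by omega)
      simp only [List.reverse_cons, List.reverse_nil, List.nil_append, List.singleton_append]
      rw [List.find?_cons, hPw]
      exact ih m (by omega) hPm (fun k hk1 hk2 => hmax k hk1 (by omega))


-- the core: A's min/max fold over hit cells equals B's outside-in column bounds
theorem pv_bounds (rows : List (List String)) (hne : rows ≠ [])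
    (hall : ∀ row ∈ rows, row.any (fun cell => cell != "x") = true) :
    rows.foldl
        (fun (q : Int × Int) row =>
          (PySem.List.enumerate row 0).foldl
            (fun (q : Int × Int) jc =>
              if jc.2 != "x" then (min q.1 jc.1, max q.2 jc.1) else q) q)
        (((rows.headD []).length : Int), 0)
      = ((((((List.range (rows.foldl (fun w r => max w r.length) 0)).find? (pvColHas rows)).getD 0 : Nat)) : Int),
         (((((List.range (rows.foldl (fun w r => max w r.length) 0)).reverse.find? (pvColHas rows)).getD 0 : Nat)) : Int)) := by
  obtain ⟨r0, rs, rfl⟩ : ∃ r0 rs, rows = r0 :: rs := by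
    cases rows with
    | nil => exact absurd rfl hne
    | cons a l => exact ⟨a, l, rfl⟩
  set rows := r0 :: rs with hrows
  -- a concrete hit in the first row
  obtain ⟨c0, hc0mem, hc0⟩ := List.any_eq_true.mp (hall r0 (by simp [hrows]))
  obtain ⟨k0, hk0, rfl⟩ := List.mem_iff_getElem.mp hc0mem
  have hP0 : pvColHas rows k0 = true := by
    unfold pvColHas
    refine List.any_eq_true.mpr ⟨r0, by simp [hrows], ?_⟩
    simp [hk0, List.getD_eq_getElem _ _ hk0, hc0]
  have hex : ∃ k, pvColHas rows k = true := ⟨k0, hP0⟩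
  set w := rows.foldl (fun w r => max w r.length) 0 with hw
  -- every hit column is below the width
  have hlt : ∀ k, pvColHas rows k = true → k < w := by
    intro k hk
    obtain ⟨row, hrow, hcond⟩ := List.any_eq_true.mp hk
    have hklen : k < row.length := by
      by_contra h
      simp [h] at hcond
    exact lt_of_lt_of_le hklen (pv_foldl_maxlen_ge rows 0 row hrow)
  set fst := Nat.find hex with hfst
  set lst := Nat.findGreatest (fun k => pvColHas rows k = true) w with hlst
  have hPfst : pvColHas rows fst = true := Nat.find_spec hex
  have hPlst : pvColHas rows lst = true :=
    Nat.findGreatest_spec (P := fun k => pvColHas rows k = true) (le_of_lt (hlt k0 hP0)) hP0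
  -- B's two scans return exactly fst and lst
  have hfind : (List.range w).find? (pvColHas rows) = some fst := by
    refine pv_find_range _ w fst (hlt fst hPfst) hPfst ?_
    intro k hk
    have := Nat.find_min hex hk
    simpa using this
  have hfindr : (List.range w).reverse.find? (pvColHas rows) = some lst := by
    refine pv_find_range_rev _ w lst (hlt lst hPlst) hPlst ?_
    intro k hk1 hk2
    have := Nat.findGreatest_is_greatest (P := fun k => pvColHas rows k = true) hk1 (le_of_lt hk2)
    simpa using this
  -- A's fold, rewritten as min/max folds over the flat hit list
  have hfold :
      rows.foldl
          (fun (q : Int × Int) row =>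
            (PySem.List.enumerate row 0).foldl
              (fun (q : Int × Int) jc =>
                if jc.2 != "x" then (min q.1 jc.1, max q.2 jc.1) else q) q)
          (((rows.headD []).length : Int), 0)
        = ((pvHits rows).foldl min ((r0.length : Int)),
           (pvHits rows).foldl max 0) := by
    have h1 : ∀ (row : List String) (q : Int × Int),
        (PySem.List.enumerate row 0).foldl
            (fun (q : Int × Int) jc =>
              if jc.2 != "x" then (min q.1 jc.1, max q.2 jc.1) else q) q
          = List.foldl (fun (q : Int × Int) (j : Int) => (min q.1 j, max q.2 j)) q
              (((PySem.List.enumerate row 0).filter (fun jc => jc.2 != "x")).map (·.1)) := by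
      intro row q
      exact pv_foldl_if_filter_map (fun (jc : Int × String) => jc.2 != "x")
        (fun (jc : Int × String) => jc.1)
        (fun (q : Int × Int) (j : Int) => (min q.1 j, max q.2 j)) _ q
    have hfun : (fun (q : Int × Int) (row : List String) =>
        (PySem.List.enumerate row 0).foldl
          (fun (q : Int × Int) jc =>
            if jc.2 != "x" then (min q.1 jc.1, max q.2 jc.1) else q) q)
      = (fun (q : Int × Int) (row : List String) =>
          List.foldl (fun (q : Int × Int) (j : Int) => (min q.1 j, max q.2 j)) q
            (((PySem.List.enumerate row 0).filter (fun jc => jc.2 != "x")).map (·.1))) :=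
      funext fun q => funext fun row => h1 row q
    rw [hfun, ← pv_foldl_flatMap, pv_foldl_minmax]
    simp [pvHits, hrows]
  rw [hfold, hfind, hfindr]
  simp only [Option.getD_some]
  rw [Prod.mk.injEq]
  constructor
  · -- min component equals fst
    have hmemf : (fst : Int) ∈ pvHits rows :=
      (pv_mem_hits_iff rows _).mpr ⟨fst, hPfst, rfl⟩
    have hle : (pvHits rows).foldl min ((r0.length : Int)) ≤ (fst : Int) :=
      pv_foldl_min_le_mem _ _ _ hmemf
    have hge : (fst : Int) ≤ (pvHits rows).foldl min ((r0.length : Int)) := by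
      rcases pv_foldl_min_cases (pvHits rows) ((r0.length : Int)) with h | h
      · exfalso
        have hmem0 : ((k0 : Nat) : Int) ∈ pvHits rows :=
          (pv_mem_hits_iff rows _).mpr ⟨k0, hP0, rfl⟩
        have := pv_foldl_min_le_mem (pvHits rows) ((r0.length : Int)) _ hmem0
        rw [h] at this
        have : (r0.length : Int) ≤ (k0 : Int) := this
        omega
      · obtain ⟨k, hk, heq⟩ := (pv_mem_hits_iff rows _).mp h
        rw [heq]
        exact_mod_cast Nat.find_min' hex hk
    exact le_antisymm hle hge
  · -- max component equals lst
    have hmeml : (lst : Int) ∈ pvHits rows :=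
      (pv_mem_hits_iff rows _).mpr ⟨lst, hPlst, rfl⟩
    have hge : (lst : Int) ≤ (pvHits rows).foldl max 0 :=
      pv_foldl_max_ge_mem _ _ _ hmeml
    have hle : (pvHits rows).foldl max 0 ≤ (lst : Int) := by
      rcases pv_foldl_max_cases (pvHits rows) 0 with h | h
      · rw [h]; exact_mod_cast Int.ofNat_nonneg lst
      · obtain ⟨k, hk, heq⟩ := (pv_mem_hits_iff rows _).mp h
        rw [heq]
        have : k ≤ lst := Nat.le_findGreatest (le_of_lt (hlt k hk)) hk
        exact_mod_cast this
    exact le_antisymm hle hge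

-- ===== VERDICT (by name: the statement is the Claim_ definition above) =====
theorem get_actual_board_spec : Claim_equal_get_actual_board := by
  intro board _
  unfold Spec_get_actual_board get_actual_board get_actual_board_alt
  simp only []
  by_cases h : board.filter (fun row => row.any (fun cell => cell != "x")) = []
  · simp [h]
  · simp only [if_neg h]
    have hall : ∀ row ∈ board.filter (fun row => row.any (fun cell => cell != "x")),
        row.any (fun cell => cell != "x") = true := by
      intro row hrow
      exact (List.mem_filter.mp hrow).2
    rw [pv_bounds _ h hall]
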